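-- pv_equiv track=rewrite | github.com/Loondas/PythonRecordKeeper | study/cgi-bin/edit.py | ReadCGI
-- ===== SOURCE A (Python) =====
-- def ReadCGI(dat):
--
--     ret = ["0","0","0"]
--     for key in dat:
--         if key == "zNumber":
--             ret[2] = dat[key]
--         elif key == "zName":
--             ret[0] = dat[key]
--         elif key == "zEmail":
--             ret[1] = dat[key]
--         else:
--             ret.append(dat[key])
--     return ret
-- ===== SOURCE B (Python) =====
-- def ReadCGI(dat):
--     pos = {"zName": 0, "zEmail": 1, "zNumber": 2}
--     items = list(dat.items()) + [(k, "0") for k in pos if k not in dat]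
--     items.sort(key=lambda kv: pos.get(kv[0], 3))
--     return [v for _, v in items]
-- ===== Notes on version B (the rewrite author's own statement) =====
-- stated objective: alternative
-- what changed: Replaces the branching slot-overwrite loop with a pad-and-stable-sort scheme: missing special keys are first padded with ('key','0') defaults, then all items are stably sorted by a position table (zName,zEmail,zNumber -> 0,1,2, everything else -> 3) and the values are read off.
import Mathlib
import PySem

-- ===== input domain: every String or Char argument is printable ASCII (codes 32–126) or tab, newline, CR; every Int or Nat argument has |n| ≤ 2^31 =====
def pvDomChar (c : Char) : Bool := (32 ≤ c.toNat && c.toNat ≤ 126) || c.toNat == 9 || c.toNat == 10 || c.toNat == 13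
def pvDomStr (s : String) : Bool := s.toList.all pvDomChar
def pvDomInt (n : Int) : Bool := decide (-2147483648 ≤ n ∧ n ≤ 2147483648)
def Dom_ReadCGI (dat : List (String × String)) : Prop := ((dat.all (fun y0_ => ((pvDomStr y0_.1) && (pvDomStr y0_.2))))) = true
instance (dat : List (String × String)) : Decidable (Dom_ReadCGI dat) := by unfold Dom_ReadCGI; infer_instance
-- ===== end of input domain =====

-- ===== PORT A =====
-- B replaces the branching slot-overwrite loop by padding missing special keys with '0'
-- defaults and stably sorting the items by a position table (objective: alternative).
-- Port of A: the Python dict is the assoc list through PySem.Dict.ofList; 'for key in dat'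
-- iterates the dict's keys in insertion order; 'dat[key]' is exact as getD since key ∈ keys.
def ReadCGI (dat : List (String × String)) : List String :=
  let d := PySem.Dict.ofList dat
  (PySem.Dict.keys d).foldl (fun ret key =>
    if key == "zNumber" then ret.set 2 (d.getD key "")
    else if key == "zName" then ret.set 0 (d.getD key "")
    else if key == "zEmail" then ret.set 1 (d.getD key "")
    else ret ++ [d.getD key ""]) ["0", "0", "0"]

-- ===== PORT B =====
-- Port of B: list.sort(key=…) is PySem.List.sorted (stable, same as Python's Timsort result);
-- 'k not in dat' is Dict.contains; pos.get(k, 3) is Dict.getD.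
def ReadCGI_alt (dat : List (String × String)) : List String :=
  let d := PySem.Dict.ofList dat
  let pos : PySem.Dict String Int :=
    PySem.Dict.ofList [("zName", 0), ("zEmail", 1), ("zNumber", 2)]
  let items := d.items ++
    ((pos.keys.filter (fun k => !(d.contains k))).map (fun k => (k, "0")))
  (PySem.List.sorted items (fun kv => pos.getD kv.1 3)).map (fun kv => kv.2)

-- ===== PRECONDITION & SPEC =====
def Spec_ReadCGI (dat : List (String × String)) (out : List String) : Prop := out = ReadCGI_alt dat
instance (dat : List (String × String)) (out : List String) : Decidable (Spec_ReadCGI dat out) := by unfold Spec_ReadCGI; infer_instance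

-- ===== CLAIM (what is proved, stated in full; the proofs are below) =====
def Claim_equal_ReadCGI : Prop := ∀ (dat : List (String × String)), Dom_ReadCGI dat → Spec_ReadCGI dat (ReadCGI dat)

-- ===== LEMMAS AND PROOFS =====

-- first-match lookup on an items list, expressed on the list
def pvLook (l : List (String × String)) (k dflt : String) : String :=
  ((l.find? (fun p => p.1 == k)).map Prod.snd).getD dflt

-- the position key as a plain if-chain
def pvKf (kv : String × String) : Int :=
  if kv.1 = "zName" then 0 else if kv.1 = "zEmail" then 1
  else if kv.1 = "zNumber" then 2 else 3

theorem pvLook_not_mem (l : List (String × String)) (k dflt : String)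
    (h : k ∉ l.map Prod.fst) : pvLook l k dflt = dflt := by
  induction l with
  | nil => rfl
  | cons p rest ih =>
    simp only [List.map_cons, List.mem_cons, not_or] at h
    have hb : (p.1 == k) = false := by
      simp only [beq_eq_false_iff_ne]; exact fun e => h.1 e.symm
    simp only [pvLook, List.find?, hb] at ih ⊢
    exact ih h.2

-- A's loop over an items list with distinct keys produces three lookups plus the filtered rest
theorem pvFold_eq (l : List (String × String)) (hnd : (l.map Prod.fst).Nodup)
    (a b c : String) (tail : List String) :
    l.foldl (fun ret (p : String × String) =>
        if p.1 == "zNumber" then ret.set 2 p.2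
        else if p.1 == "zName" then ret.set 0 p.2
        else if p.1 == "zEmail" then ret.set 1 p.2
        else ret ++ [p.2]) ([a, b, c] ++ tail)
      = [pvLook l "zName" a, pvLook l "zEmail" b, pvLook l "zNumber" c] ++ tail
        ++ (l.filter (fun kv => !(kv.1 == "zName" || kv.1 == "zEmail" || kv.1 == "zNumber"))).map Prod.snd := by
  induction l generalizing a b c tail with
  | nil => simp [pvLook]
  | cons p rest ih =>
    obtain ⟨k, v⟩ := p
    simp only [List.map_cons, List.nodup_cons] at hnd
    obtain ⟨hk, hrest⟩ := hnd
    by_cases h2 : k = "zNumber"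
    · have b2 : (k == "zNumber") = true := by simp [h2]
      have b0 : (k == "zName") = false := by simp [h2]
      have b1 : (k == "zEmail") = false := by simp [h2]
      have hk' : "zNumber" ∉ rest.map Prod.fst := h2 ▸ hk
      simp only [List.foldl_cons, b2, if_true, List.filter_cons]
      rw [show ([a, b, c] ++ tail).set 2 v = [a, b, v] ++ tail from rfl, ih hrest]
      rw [pvLook_not_mem rest "zNumber" v hk']
      simp [pvLook, List.find?, b0, b1, b2]
    · by_cases h0 : k = "zName"
      · have b2 : (k == "zNumber") = false := by simp [h2]
        have b0 : (k == "zName") = true := by simp [h0]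
        have b1 : (k == "zEmail") = false := by simp [h0]
        have hk' : "zName" ∉ rest.map Prod.fst := h0 ▸ hk
        simp only [List.foldl_cons, b2, b0, Bool.false_eq_true, if_false, if_true,
          List.filter_cons]
        rw [show ([a, b, c] ++ tail).set 0 v = [v, b, c] ++ tail from rfl, ih hrest]
        rw [pvLook_not_mem rest "zName" v hk']
        simp [pvLook, List.find?, b0, b1, b2]
      · by_cases h1 : k = "zEmail"
        · have b2 : (k == "zNumber") = false := by simp [h2]
          have b0 : (k == "zName") = false := by simp [h1]
          have b1 : (k == "zEmail") = true := by simp [h1]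
          have hk' : "zEmail" ∉ rest.map Prod.fst := h1 ▸ hk
          simp only [List.foldl_cons, b2, b0, b1, Bool.false_eq_true, if_false, if_true,
            List.filter_cons]
          rw [show ([a, b, c] ++ tail).set 1 v = [a, v, c] ++ tail from rfl, ih hrest]
          rw [pvLook_not_mem rest "zEmail" v hk']
          simp [pvLook, List.find?, b0, b1, b2]
        · have b2 : (k == "zNumber") = false := by simp [h2]
          have b0 : (k == "zName") = false := by simp [h0]
          have b1 : (k == "zEmail") = false := by simp [h1]
          simp only [List.foldl_cons, b2, b0, b1, Bool.false_eq_true, if_false,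
            List.filter_cons, Bool.or_self, Bool.not_false, if_true]
          rw [show ([a, b, c] ++ tail) ++ [v] = [a, b, c] ++ (tail ++ [v]) from
            List.append_assoc _ _ _, ih hrest]
          simp [pvLook, List.find?, b0, b1, b2]

-- the sort key of B's port is the if-chain pvKf
theorem pvKey_eq :
    (fun kv : String × String =>
      (PySem.Dict.ofList [("zName", (0:Int)), ("zEmail", 1), ("zNumber", 2)]).getD kv.1 3) = pvKf := by
  have hmk : PySem.Dict.ofList [("zName", (0:Int)), ("zEmail", 1), ("zNumber", 2)]
      = PySem.Dict.mk [("zName", 0), ("zEmail", 1), ("zNumber", 2)] := by decide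
  funext kv
  rw [hmk]
  by_cases h0 : kv.1 = "zName"
  · simp [pvKf, h0]; decide
  · by_cases h1 : kv.1 = "zEmail"
    · simp [pvKf, h0, h1]; decide
    · by_cases h2 : kv.1 = "zNumber"
      · simp [pvKf, h0, h1, h2]; decide
      · have b0 : ("zName" == kv.1) = false := by simp; exact fun e => h0 e.symm
        have b1 : ("zEmail" == kv.1) = false := by simp; exact fun e => h1 e.symm
        have b2 : ("zNumber" == kv.1) = false := by simp; exact fun e => h2 e.symm
        simp [pvKf, h0, h1, h2, PySem.Dict.getD_eq_get?_getD, PySem.Dict.get?_mk_cons,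
          b0, b1, b2, PySem.Dict.get?]

-- inserting x into p ++ s when p's keys are ≤ key x and s's keys are > key x
theorem pvInsertBy_mid {α : Type} (key : α → Int) (x : α) (p s : List α)
    (hp : ∀ y ∈ p, key y ≤ key x) (hs : ∀ y ∈ s, key x < key y) :
    PySem.List.insertBy (fun a b => decide (key a < key b)) x (p ++ s) = p ++ x :: s := by
  induction p with
  | nil =>
    cases s with
    | nil => rfl
    | cons y ys =>
      have : (decide (key x < key y)) = true := by
        simp; exact hs y (List.mem_cons_self ..)
      simp [PySem.List.insertBy, this]
  | cons y p' ih =>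
    have hy : ¬ key x < key y := not_lt.2 (hp y (List.mem_cons_self ..))
    have : (decide (key x < key y)) = false := by simp [hy]
    simp only [List.cons_append, PySem.List.insertBy, this, Bool.false_eq_true, if_false,
      List.cons.injEq, true_and]
    exact ih (fun z hz => hp z (List.mem_cons_of_mem _ hz))

-- the stable sort by pvKf is the concatenation of the four key groups, in order
theorem pvSorted_groups (xs : List (String × String)) :
    PySem.List.sorted xs pvKf
      = xs.filter (fun y => pvKf y == 0) ++ (xs.filter (fun y => pvKf y == 1)
        ++ (xs.filter (fun y => pvKf y == 2) ++ xs.filter (fun y => pvKf y == 3))) := by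
  induction xs using List.reverseRecOn with
  | nil => rfl
  | append_singleton xs x ih =>
    have hsnoc : PySem.List.sorted (xs ++ [x]) pvKf
        = PySem.List.insertBy (fun a b => decide (pvKf a < pvKf b)) x
            (PySem.List.sorted xs pvKf) := by
      rw [PySem.List.sorted_eq_foldl_insertBy, PySem.List.sorted_eq_foldl_insertBy,
        List.foldl_append]
      rfl
    have hbound : ∀ y : String × String, pvKf y = 0 ∨ pvKf y = 1 ∨ pvKf y = 2 ∨ pvKf y = 3 := by
      intro y; unfold pvKf; split_ifs <;> simp
    have hf : ∀ (i : Int) (y : String × String), y ∈ xs.filter (fun y => pvKf y == i) → pvKf y = i := by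
      intro i y hy
      have := (List.mem_filter.1 hy).2
      simpa using this
    rw [hsnoc, ih]
    simp only [List.filter_append]
    rcases hbound x with h | h | h | h
    · have hx0 : (pvKf x == 0) = true := by simp [h]
      have hx1 : (pvKf x == 1) = false := by simp [h]
      have hx2 : (pvKf x == 2) = false := by simp [h]
      have hx3 : (pvKf x == 3) = false := by simp [h]
      simp only [List.filter_cons, List.filter_nil, hx0, hx1, hx2, hx3, if_true,
        Bool.false_eq_true, if_false, List.append_nil]
      have := pvInsertBy_mid pvKf x (xs.filter (fun y => pvKf y == 0))
        (xs.filter (fun y => pvKf y == 1) ++ (xs.filter (fun y => pvKf y == 2)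
          ++ xs.filter (fun y => pvKf y == 3)))
        (by intro y hy; rw [hf 0 y hy, h])
        (by
          intro y hy; rw [h]
          rcases List.mem_append.1 hy with h' | h'
          · rw [hf 1 y h']; norm_num
          · rcases List.mem_append.1 h' with h'' | h''
            · rw [hf 2 y h'']; norm_num
            · rw [hf 3 y h'']; norm_num)
      rw [this]
      simp
    · have hx0 : (pvKf x == 0) = false := by simp [h]
      have hx1 : (pvKf x == 1) = true := by simp [h]
      have hx2 : (pvKf x == 2) = false := by simp [h]
      have hx3 : (pvKf x == 3) = false := by simp [h]
      simp only [List.filter_cons, List.filter_nil, hx0, hx1, hx2, hx3, if_true,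
        Bool.false_eq_true, if_false, List.append_nil]
      rw [show xs.filter (fun y => pvKf y == 0) ++ (xs.filter (fun y => pvKf y == 1)
            ++ (xs.filter (fun y => pvKf y == 2) ++ xs.filter (fun y => pvKf y == 3)))
          = (xs.filter (fun y => pvKf y == 0) ++ xs.filter (fun y => pvKf y == 1))
            ++ (xs.filter (fun y => pvKf y == 2) ++ xs.filter (fun y => pvKf y == 3)) from by
        simp [List.append_assoc]]
      have := pvInsertBy_mid pvKf x
        (xs.filter (fun y => pvKf y == 0) ++ xs.filter (fun y => pvKf y == 1))
        (xs.filter (fun y => pvKf y == 2) ++ xs.filter (fun y => pvKf y == 3))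
        (by
          intro y hy; rw [h]
          rcases List.mem_append.1 hy with h' | h'
          · rw [hf 0 y h']; norm_num
          · rw [hf 1 y h'])
        (by
          intro y hy; rw [h]
          rcases List.mem_append.1 hy with h' | h'
          · rw [hf 2 y h']; norm_num
          · rw [hf 3 y h']; norm_num)
      rw [this]
      simp
    · have hx0 : (pvKf x == 0) = false := by simp [h]
      have hx1 : (pvKf x == 1) = false := by simp [h]
      have hx2 : (pvKf x == 2) = true := by simp [h]
      have hx3 : (pvKf x == 3) = false := by simp [h]
      simp only [List.filter_cons, List.filter_nil, hx0, hx1, hx2, hx3, if_true,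
        Bool.false_eq_true, if_false, List.append_nil]
      rw [show xs.filter (fun y => pvKf y == 0) ++ (xs.filter (fun y => pvKf y == 1)
            ++ (xs.filter (fun y => pvKf y == 2) ++ xs.filter (fun y => pvKf y == 3)))
          = (xs.filter (fun y => pvKf y == 0) ++ (xs.filter (fun y => pvKf y == 1)
            ++ xs.filter (fun y => pvKf y == 2))) ++ xs.filter (fun y => pvKf y == 3) from by
        simp [List.append_assoc]]
      have := pvInsertBy_mid pvKf x
        (xs.filter (fun y => pvKf y == 0) ++ (xs.filter (fun y => pvKf y == 1)
          ++ xs.filter (fun y => pvKf y == 2)))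
        (xs.filter (fun y => pvKf y == 3))
        (by
          intro y hy; rw [h]
          rcases List.mem_append.1 hy with h' | h'
          · rw [hf 0 y h']; norm_num
          · rcases List.mem_append.1 h' with h'' | h''
            · rw [hf 1 y h'']; norm_num
            · rw [hf 2 y h''])
        (by intro y hy; rw [h, hf 3 y hy]; norm_num)
      rw [this]
      simp
    · have hx0 : (pvKf x == 0) = false := by simp [h]
      have hx1 : (pvKf x == 1) = false := by simp [h]
      have hx2 : (pvKf x == 2) = false := by simp [h]
      have hx3 : (pvKf x == 3) = true := by simp [h]
      simp only [List.filter_cons, List.filter_nil, hx0, hx1, hx2, hx3, if_true,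
        Bool.false_eq_true, if_false, List.append_nil]
      have := pvInsertBy_mid pvKf x
        (xs.filter (fun y => pvKf y == 0) ++ (xs.filter (fun y => pvKf y == 1)
          ++ (xs.filter (fun y => pvKf y == 2) ++ xs.filter (fun y => pvKf y == 3)))) []
        (by
          intro y hy; rw [h]
          rcases List.mem_append.1 hy with h' | h'
          · rw [hf 0 y h']; norm_num
          · rcases List.mem_append.1 h' with h'' | h''
            · rw [hf 1 y h'']; norm_num
            · rcases List.mem_append.1 h'' with h3 | h3
              · rw [hf 2 y h3]; norm_num
              · rw [hf 3 y h3])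
        (by intro y hy; simp at hy)
      rw [List.append_nil] at this
      rw [this]
      simp [List.append_assoc]

-- a key absent from the keys of l filters to nothing
theorem pvFilter_of_not_mem (l : List (String × String)) (k : String)
    (h : k ∉ l.map Prod.fst) : l.filter (fun kv => kv.1 == k) = [] := by
  induction l with
  | nil => rfl
  | cons p rest ih =>
    simp only [List.map_cons, List.mem_cons, not_or] at h
    have hb : (p.1 == k) = false := by
      simp only [beq_eq_false_iff_ne]; exact fun e => h.1 e.symm
    simp only [List.filter_cons, hb, Bool.false_eq_true, if_false]
    exact ih h.2

-- a key present among distinct keys filters to exactly its first binding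
theorem pvFilter_of_mem (l : List (String × String)) (hnd : (l.map Prod.fst).Nodup)
    (k dflt : String) (h : k ∈ l.map Prod.fst) :
    l.filter (fun kv => kv.1 == k) = [(k, pvLook l k dflt)] := by
  induction l with
  | nil => simp at h
  | cons p rest ih =>
    simp only [List.map_cons, List.nodup_cons] at hnd
    obtain ⟨hk, hrest⟩ := hnd
    by_cases he : p.1 = k
    · have hb : (p.1 == k) = true := by simp [he]
      have hnm : k ∉ rest.map Prod.fst := he ▸ hk
      simp only [List.filter_cons, hb, if_true, pvFilter_of_not_mem rest k hnm]
      have : p = (k, p.2) := by rw [← he]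
      rw [this]
      simp [pvLook, List.find?, hb]
    · have hb : (p.1 == k) = false := by simp [he]
      have hm : k ∈ rest.map Prod.fst := by
        simp only [List.map_cons, List.mem_cons] at h
        rcases h with h' | h'
        · exact absurd h'.symm he
        · exact h'
      simp only [List.filter_cons, hb, Bool.false_eq_true, if_false]
      rw [ih hrest hm]
      simp [pvLook, List.find?, hb]

-- the four sort-key predicates, in terms of the key strings
theorem pvP0 : (fun y : String × String => pvKf y == 0) = (fun kv => kv.1 == "zName") := by
  funext y; unfold pvKf; split_ifs with a b c <;> simp_all
theorem pvP1 : (fun y : String × String => pvKf y == 1) = (fun kv => kv.1 == "zEmail") := by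
  funext y; unfold pvKf; split_ifs with a b c <;> simp_all
theorem pvP2 : (fun y : String × String => pvKf y == 2) = (fun kv => kv.1 == "zNumber") := by
  funext y; unfold pvKf; split_ifs with a b c <;> simp_all
theorem pvP3 : (fun y : String × String => pvKf y == 3)
    = (fun kv => !(kv.1 == "zName" || kv.1 == "zEmail" || kv.1 == "zNumber")) := by
  funext y; unfold pvKf; split_ifs with a b c <;> simp_all

-- B's pipeline on an items list with distinct keys yields A's three-lookups-plus-rest shape
theorem pvB_eq (l : List (String × String)) (hnd : (l.map Prod.fst).Nodup) :
    (PySem.List.sorted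
      (l ++ ((["zName", "zEmail", "zNumber"].filter
                (fun k => !(decide (k ∈ l.map Prod.fst)))).map (fun k => (k, "0")))) pvKf).map
        (fun kv => kv.2)
      = [pvLook l "zName" "0", pvLook l "zEmail" "0", pvLook l "zNumber" "0"]
        ++ (l.filter (fun kv => !(kv.1 == "zName" || kv.1 == "zEmail" || kv.1 == "zNumber"))).map Prod.snd := by
  rw [pvSorted_groups]
  simp only [pvP0, pvP1, pvP2, pvP3, List.filter_append]
  by_cases hN : "zName" ∈ l.map Prod.fst <;>
    by_cases hE : "zEmail" ∈ l.map Prod.fst <;>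
      by_cases hB : "zNumber" ∈ l.map Prod.fst <;>
  · first
    | (rw [pvFilter_of_mem l hnd "zName" "0" hN]) | (rw [pvFilter_of_not_mem l "zName" hN, pvLook_not_mem l "zName" "0" hN])
    first
    | (rw [pvFilter_of_mem l hnd "zEmail" "0" hE]) | (rw [pvFilter_of_not_mem l "zEmail" hE, pvLook_not_mem l "zEmail" "0" hE])
    first
    | (rw [pvFilter_of_mem l hnd "zNumber" "0" hB]) | (rw [pvFilter_of_not_mem l "zNumber" hB, pvLook_not_mem l "zNumber" "0" hB])
    simp [List.filter, hN, hE, hB]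

-- ===== VERDICT (by name: the statement is the Claim_ definition above) =====
theorem ReadCGI_spec : Claim_equal_ReadCGI := by
  intro dat _
  show ReadCGI dat = ReadCGI_alt dat
  simp only [ReadCGI, ReadCGI_alt]
  have hnd : ((PySem.Dict.ofList dat).items.map Prod.fst).Nodup :=
    PySem.Dict.nodup_keys_ofList dat
  -- A's loop, rewritten to lookups plus the filtered rest
  have hcong := PySem.List.foldl_congr_mem (PySem.Dict.ofList dat).items
    (fun ret (p : String × String) =>
      if p.1 == "zNumber" then ret.set 2 ((PySem.Dict.ofList dat).getD p.1 "")
      else if p.1 == "zName" then ret.set 0 ((PySem.Dict.ofList dat).getD p.1 "")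
      else if p.1 == "zEmail" then ret.set 1 ((PySem.Dict.ofList dat).getD p.1 "")
      else ret ++ [(PySem.Dict.ofList dat).getD p.1 ""])
    (fun ret (p : String × String) =>
      if p.1 == "zNumber" then ret.set 2 p.2
      else if p.1 == "zName" then ret.set 0 p.2
      else if p.1 == "zEmail" then ret.set 1 p.2
      else ret ++ [p.2])
    ["0", "0", "0"]
    (by
      intro acc p hp
      obtain ⟨k, v⟩ := p
      simp only [PySem.Dict.getD_of_mem_items (PySem.Dict.ofList dat) hp hnd ""])
  rw [show PySem.Dict.keys (PySem.Dict.ofList dat)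
        = (PySem.Dict.ofList dat).items.map Prod.fst from rfl, List.foldl_map, hcong,
    show (["0", "0", "0"] : List String) = ["0", "0", "0"] ++ [] from rfl,
    pvFold_eq _ hnd "0" "0" "0" []]
  -- B's pipeline, rewritten through the stable-sort group decomposition
  have hkeys : PySem.Dict.keys
      (PySem.Dict.ofList [("zName", (0:Int)), ("zEmail", 1), ("zNumber", 2)])
      = ["zName", "zEmail", "zNumber"] := by decide
  have hcont : (fun k => !(PySem.Dict.contains (PySem.Dict.ofList dat) k))
      = (fun k => !(decide (k ∈ (PySem.Dict.ofList dat).items.map Prod.fst))) := by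
    funext k
    rw [PySem.Dict.contains_eq_decide_mem_keys]
    rfl
  rw [pvKey_eq, hkeys, hcont, pvB_eq _ hnd]
  simp
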